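-- pv_equiv track=rewrite | github.com/DerpLEL/chatbot-internship | Documents/Homework/nois_intern/usecase2/usable/chatbot-internship-thien-usecase2-01/delete_leave_application.py | new_line_formatter
-- ===== SOURCE A (Python) =====
-- def new_line_formatter(response):
--     final_response = ''
--     paragraphs = response.split('\n\n')  # Split the response into paragraphs using '\n\n'
--
--     for i, paragraph in enumerate(paragraphs):
--         lines = paragraph.split('\n')
--         paragraph_html = '<div>' + '</div><div>'.join(lines) + '</div>'
--         final_response += paragraph_html
--         if i < len(paragraphs) - 1:
--             final_response += '<br>'  # Add an extra <div></div> between paragraphs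
--
--     return final_response
-- ===== SOURCE B (Python) =====
-- def new_line_formatter(response):
--     # Ordered substitution: paragraph breaks first, then single line breaks, then one outer wrap.
--     return ('<div>'
--             + response.replace('\n\n', '</div><br><div>').replace('\n', '</div><div>')
--             + '</div>')
-- ===== Notes on version B (the rewrite author's own statement) =====
-- stated objective: simpler
-- what changed: Replaced the split-into-paragraphs loop with nested split/join and an indexed last-paragraph branch by two ordered string replacements ('\n\n' then '\n') and a single outer <div>...</div> wrap.
import Mathlib
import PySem

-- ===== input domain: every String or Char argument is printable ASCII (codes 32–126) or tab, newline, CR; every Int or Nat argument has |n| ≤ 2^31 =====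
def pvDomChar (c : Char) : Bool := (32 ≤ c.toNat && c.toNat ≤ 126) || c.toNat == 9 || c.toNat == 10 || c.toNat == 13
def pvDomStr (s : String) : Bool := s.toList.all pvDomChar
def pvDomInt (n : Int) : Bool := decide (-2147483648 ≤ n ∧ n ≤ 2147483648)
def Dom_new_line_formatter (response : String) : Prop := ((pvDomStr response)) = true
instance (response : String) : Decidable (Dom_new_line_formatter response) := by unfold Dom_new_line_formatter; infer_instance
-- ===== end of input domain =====

-- B replaces A's paragraph/line split-join loop by two ordered string substitutions and one outer wrap (objective: simpler).

-- ===== PORT A =====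
-- literal port of A: split on "\n\n", then for each paragraph split on "\n",
-- join with "</div><div>", wrap in <div>…</div>, and append "<br>" between paragraphs.
def new_line_formatter (response : String) : String :=
  let paragraphs := PySem.Chars.splitOn response.toList ['\n', '\n']
  let final_response := (PySem.List.enumerate paragraphs).foldl
    (fun final_response ip =>
      let lines := PySem.Chars.splitOn ip.2 ['\n']
      let paragraph_html := "<div>".toList ++ PySem.Chars.join "</div><div>".toList lines ++ "</div>".toList
      let final_response := final_response ++ paragraph_html
      if ip.1 < (paragraphs.length : Int) - 1 then final_response ++ "<br>".toList
      else final_response) []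
  String.ofList final_response

-- ===== PORT B =====
-- literal port of Source B: '<div>' + response.replace('\n\n','</div><br><div>').replace('\n','</div><div>') + '</div>'
def new_line_formatter_alt (response : String) : String :=
  String.ofList ("<div>".toList
    ++ PySem.Chars.replace (PySem.Chars.replace response.toList ['\n', '\n'] "</div><br><div>".toList)
         ['\n'] "</div><div>".toList
    ++ "</div>".toList)

-- ===== PRECONDITION & SPEC =====
def Spec_new_line_formatter (response : String) (out : String) : Prop := out = new_line_formatter_alt response
instance (response : String) (out : String) : Decidable (Spec_new_line_formatter response out) := by unfold Spec_new_line_formatter; infer_instance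

-- ===== CLAIM (what is proved, stated in full; the proofs are below) =====
def Claim_equal_new_line_formatter : Prop := ∀ (response : String), Dom_new_line_formatter response → Spec_new_line_formatter response (new_line_formatter response)

-- ===== LEMMAS AND PROOFS =====

-- cons the char onto the first piece of a split (a split is never empty; [] case unreachable)
def consHead (c : Char) : List (List Char) → List (List Char)
  | p :: r => (c :: p) :: r
  | [] => [[c]]

-- structural version of split on "\n\n"
def spNN : List Char → List (List Char)
  | [] => [[]]
  | c :: t =>
    if c = '\n' then
      match t with
      | c2 :: t2 => if c2 = '\n' then [] :: spNN t2 else consHead c (spNN (c2 :: t2))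
      | [] => [[c]]
    else consHead c (spNN t)

-- structural version of split on "\n"
def spN : List Char → List (List Char)
  | [] => [[]]
  | c :: t => if c = '\n' then [] :: spN t else consHead c (spN t)

-- structural version of replace "\n\n" → "</div><br><div>"
def repNN : List Char → List Char
  | [] => []
  | c :: t =>
    if c = '\n' then
      match t with
      | c2 :: t2 =>
        if c2 = '\n' then "</div><br><div>".toList ++ repNN t2 else c :: repNN (c2 :: t2)
      | [] => [c]
    else c :: repNN t

-- structural version of replace "\n" → "</div><div>"
def repN : List Char → List Char
  | [] => []
  | c :: t => if c = '\n' then "</div><div>".toList ++ repN t else c :: repN t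

-- the combined scan both programs compute
def fScan : List Char → List Char
  | [] => []
  | c :: t =>
    if c = '\n' then
      match t with
      | c2 :: t2 =>
        if c2 = '\n' then "</div><br><div>".toList ++ fScan t2
        else "</div><div>".toList ++ fScan (c2 :: t2)
      | [] => "</div><div>".toList
    else c :: fScan t

-- join with "<br>" between pieces
def joinBr : List (List Char) → List Char
  | [] => []
  | x :: xs => x ++ (if xs.isEmpty then [] else "<br>".toList ++ joinBr xs)

-- A's per-paragraph html
def gPar (p : List Char) : List Char :=
  "<div>".toList ++ PySem.Chars.join "</div><div>".toList (PySem.Chars.splitOn p ['\n']) ++ "</div>".toList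

-- step equations
theorem repNN_two (t : List Char) : repNN ('\n'::'\n'::t) = "</div><br><div>".toList ++ repNN t := by simp [repNN]
theorem repNN_one (c2 : Char) (t2 : List Char) (h : ¬ c2 = '\n') : repNN ('\n'::c2::t2) = '\n' :: repNN (c2::t2) := by simp [repNN, h]
theorem repNN_other (c : Char) (t : List Char) (h : ¬ c = '\n') : repNN (c::t) = c :: repNN t := by cases t <;> simp [repNN, h]
theorem spNN_two (t : List Char) : spNN ('\n'::'\n'::t) = [] :: spNN t := by simp [spNN]
theorem spNN_one (c2 : Char) (t2 : List Char) (h : ¬ c2 = '\n') : spNN ('\n'::c2::t2) = consHead '\n' (spNN (c2::t2)) := by simp [spNN, h]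
theorem spNN_other (c : Char) (t : List Char) (h : ¬ c = '\n') : spNN (c::t) = consHead c (spNN t) := by cases t <;> simp [spNN, h]
theorem fScan_two (t : List Char) : fScan ('\n'::'\n'::t) = "</div><br><div>".toList ++ fScan t := by simp [fScan]
theorem fScan_one (c2 : Char) (t2 : List Char) (h : ¬ c2 = '\n') : fScan ('\n'::c2::t2) = "</div><div>".toList ++ fScan (c2::t2) := by simp [fScan, h]
theorem fScan_single : fScan ['\n'] = "</div><div>".toList := by simp [fScan]
theorem fScan_other (c : Char) (t : List Char) (h : ¬ c = '\n') : fScan (c::t) = c :: fScan t := by cases t <;> simp [fScan, h]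

-- prefix tests
theorem pre2 (c2 : Char) (t2 : List Char) (h : ¬ c2 = '\n') : (['\n','\n'].isPrefixOf ('\n'::c2::t2)) = false := by
  have : ('\n' == c2) = false := beq_eq_false_iff_ne.mpr (fun hh => h hh.symm)
  simp [List.isPrefixOf, this]
theorem pre1 (c : Char) (t : List Char) (h : ¬ c = '\n') : (['\n','\n'].isPrefixOf (c::t)) = false := by
  have : ('\n' == c) = false := beq_eq_false_iff_ne.mpr (fun hh => h hh.symm)
  simp [List.isPrefixOf, this]
theorem pre0 : (['\n','\n'].isPrefixOf ['\n']) = false := by decide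
theorem preT (t : List Char) : (['\n','\n'].isPrefixOf ('\n'::'\n'::t)) = true := by simp [List.isPrefixOf]
theorem preN (c : Char) (t : List Char) (h : ¬ c = '\n') : (['\n'].isPrefixOf (c::t)) = false := by
  have : ('\n' == c) = false := beq_eq_false_iff_ne.mpr (fun hh => h hh.symm)
  simp [List.isPrefixOf, this]
theorem preNT (t : List Char) : (['\n'].isPrefixOf ('\n'::t)) = true := by simp [List.isPrefixOf]

-- nonemptiness of splits
theorem consHead_ne_nil (c : Char) (ps : List (List Char)) : consHead c ps ≠ [] := by
  cases ps <;> simp [consHead]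
theorem spNN_ne_nil (l : List Char) : spNN l ≠ [] := by
  fun_induction spNN l <;> simp_all [consHead_ne_nil]
theorem spN_ne_nil (l : List Char) : spN l ≠ [] := by
  fun_induction spN l <;> simp_all [consHead_ne_nil]

-- ---- replace = structural scans ----

theorem goNN_eq (fuel : Nat) : ∀ (l acc : List Char), l.length ≤ fuel →
    PySem.Chars.replace.go ['\n', '\n'] "</div><br><div>".toList fuel l acc = acc.reverse ++ repNN l := by
  induction fuel with
  | zero =>
    intro l acc h
    have : l = [] := by cases l <;> simp_all
    subst this; simp [PySem.Chars.replace.go, repNN]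
  | succ f ih =>
    intro l acc h
    match l with
    | [] => simp [PySem.Chars.replace.go, repNN]
    | c :: t =>
      rw [PySem.Chars.replace.go]
      by_cases hc : c = '\n'
      · subst hc
        match t with
        | [] =>
          rw [pre0]
          simp only [Bool.false_eq_true, if_false]
          rw [ih [] _ (by simp)]
          simp [repNN]
        | c2 :: t2 =>
          by_cases hc2 : c2 = '\n'
          · subst hc2
            rw [preT, if_pos rfl]
            have hdrop : List.drop (['\n','\n'] : List Char).length ('\n'::'\n'::t2) = t2 := rfl
            rw [hdrop, ih t2 _ (by simp at h ⊢; omega), repNN_two]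
            simp
          · rw [pre2 c2 t2 hc2]
            simp only [Bool.false_eq_true, if_false]
            rw [ih (c2 :: t2) _ (by simp at h ⊢; omega), repNN_one c2 t2 hc2]
            simp
      · rw [pre1 c t hc]
        simp only [Bool.false_eq_true, if_false]
        rw [ih t _ (by simp at h ⊢; omega), repNN_other c t hc]
        simp

theorem replaceNN_eq (l : List Char) :
    PySem.Chars.replace l ['\n', '\n'] "</div><br><div>".toList = repNN l := by
  simp [PySem.Chars.replace]
  simpa using goNN_eq l.length l [] le_rfl

theorem goN_eq (fuel : Nat) : ∀ (l acc : List Char), l.length ≤ fuel →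
    PySem.Chars.replace.go ['\n'] "</div><div>".toList fuel l acc = acc.reverse ++ repN l := by
  induction fuel with
  | zero =>
    intro l acc h
    have : l = [] := by cases l <;> simp_all
    subst this; simp [PySem.Chars.replace.go, repN]
  | succ f ih =>
    intro l acc h
    match l with
    | [] => simp [PySem.Chars.replace.go, repN]
    | c :: t =>
      rw [PySem.Chars.replace.go]
      by_cases hc : c = '\n'
      · subst hc
        rw [preNT, if_pos rfl]
        have hdrop : List.drop (['\n'] : List Char).length ('\n'::t) = t := rfl
        rw [hdrop, ih t _ (Nat.le_of_succ_le_succ h)]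
        simp [repN]
      · rw [preN c t hc]
        simp only [Bool.false_eq_true, if_false]
        rw [ih t _ (Nat.le_of_succ_le_succ h)]
        simp [repN, hc]

theorem replaceN_eq (l : List Char) :
    PySem.Chars.replace l ['\n'] "</div><div>".toList = repN l := by
  simp [PySem.Chars.replace]
  simpa using goN_eq l.length l [] le_rfl

-- repN passes newline-free text through unchanged
theorem repN_append_free (u v : List Char) (h : ∀ c ∈ u, c ≠ '\n') :
    repN (u ++ v) = u ++ repN v := by
  induction u with
  | nil => simp
  | cons c t ih =>
    have hc : c ≠ '\n' := h c (by simp)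
    simp only [List.cons_append, repN, if_neg hc]
    rw [ih (fun x hx => h x (by simp [hx]))]

theorem R1_free : ∀ c ∈ "</div><br><div>".toList, c ≠ '\n' := by
  intro c hc h
  subst h
  revert hc
  decide

theorem repN_repNN (l : List Char) : repN (repNN l) = fScan l := by
  fun_induction repNN l with
  | case1 => simp [repN, fScan]
  | case2 t2 ih =>
    rw [fScan_two, repN_append_free _ _ R1_free, ih]
  | case3 c2 t2 hc2 ih =>
    rw [fScan_one _ _ hc2]
    simp [repN, ih]
  | case4 => rw [fScan_single]; simp [repN]
  | case5 c t hc ih =>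
    rw [fScan_other _ _ hc]
    simp only [repN, if_neg hc]
    rw [ih]

-- ---- splitOn = structural scans ----

def consApp (x : List Char) : List (List Char) → List (List Char)
  | p :: r => (x ++ p) :: r
  | [] => [x]

theorem goSpNN_eq (fuel : Nat) : ∀ (l cur : List Char) (acc : List (List Char)), l.length < fuel →
    PySem.Chars.splitOn.go ['\n', '\n'] fuel l cur acc = acc.reverse ++ consApp cur.reverse (spNN l) := by
  induction fuel with
  | zero => intro l cur acc h; omega
  | succ f ih =>
    intro l cur acc h
    match l with
    | [] =>
      rw [PySem.Chars.splitOn.go] <;> simp [spNN, consApp]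
    | c :: t =>
      rw [PySem.Chars.splitOn.go]
      by_cases hc : c = '\n'
      · subst hc
        match t with
        | [] =>
          rw [pre0]
          simp only [Bool.false_eq_true, if_false]
          rw [ih [] ('\n' :: cur) acc (by simp only [List.length_cons, List.length_nil] at h ⊢; omega)]
          simp [spNN, consApp]
        | c2 :: t2 =>
          by_cases hc2 : c2 = '\n'
          · subst hc2
            rw [preT, if_pos rfl]
            have hdrop : List.drop (['\n','\n'] : List Char).length ('\n'::'\n'::t2) = t2 := rfl
            rw [hdrop, ih t2 [] _ (by simp at h ⊢; omega), spNN_two]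
            obtain ⟨p, r, hpr⟩ := List.exists_cons_of_ne_nil (spNN_ne_nil t2)
            simp [consApp, hpr]
          · rw [pre2 c2 t2 hc2]
            simp only [Bool.false_eq_true, if_false]
            rw [ih (c2 :: t2) ('\n' :: cur) acc (by simp at h ⊢; omega), spNN_one c2 t2 hc2]
            obtain ⟨p, r, hpr⟩ := List.exists_cons_of_ne_nil (spNN_ne_nil (c2 :: t2))
            simp [consApp, hpr, consHead]
      · rw [pre1 c t hc]
        simp only [Bool.false_eq_true, if_false]
        rw [ih t (c :: cur) acc (by simp at h ⊢; omega), spNN_other c t hc]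
        obtain ⟨p, r, hpr⟩ := List.exists_cons_of_ne_nil (spNN_ne_nil t)
        simp [consApp, hpr, consHead]

theorem splitOnNN_eq (l : List Char) : PySem.Chars.splitOn l ['\n', '\n'] = spNN l := by
  rw [PySem.Chars.splitOn, goSpNN_eq (l.length + 1) l [] [] (Nat.lt_succ_self _)]
  obtain ⟨p, r, hpr⟩ := List.exists_cons_of_ne_nil (spNN_ne_nil l)
  simp [consApp, hpr]

theorem goSpN_eq (fuel : Nat) : ∀ (l cur : List Char) (acc : List (List Char)), l.length < fuel →
    PySem.Chars.splitOn.go ['\n'] fuel l cur acc = acc.reverse ++ consApp cur.reverse (spN l) := by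
  induction fuel with
  | zero => intro l cur acc h; omega
  | succ f ih =>
    intro l cur acc h
    match l with
    | [] =>
      rw [PySem.Chars.splitOn.go] <;> simp [spN, consApp]
    | c :: t =>
      rw [PySem.Chars.splitOn.go]
      by_cases hc : c = '\n'
      · subst hc
        rw [preNT, if_pos rfl]
        have hdrop : List.drop (['\n'] : List Char).length ('\n'::t) = t := rfl
        rw [hdrop, ih t [] _ (Nat.lt_of_succ_lt_succ h)]
        obtain ⟨p, r, hpr⟩ := List.exists_cons_of_ne_nil (spN_ne_nil t)
        simp [spN, consApp, hpr]
      · rw [preN c t hc]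
        simp only [Bool.false_eq_true, if_false]
        rw [ih t (c :: cur) acc (Nat.lt_of_succ_lt_succ h)]
        obtain ⟨p, r, hpr⟩ := List.exists_cons_of_ne_nil (spN_ne_nil t)
        simp [spN, consApp, hpr, consHead, hc]

theorem splitOnN_eq (l : List Char) : PySem.Chars.splitOn l ['\n'] = spN l := by
  rw [PySem.Chars.splitOn, goSpN_eq (l.length + 1) l [] [] (Nat.lt_succ_self _)]
  obtain ⟨p, r, hpr⟩ := List.exists_cons_of_ne_nil (spN_ne_nil l)
  simp [consApp, hpr]

-- ---- inner join = repN ----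

theorem intercalate_cons_cons (sep a b : List Char) (r : List (List Char)) :
    sep.intercalate (a :: b :: r) = a ++ sep ++ sep.intercalate (b :: r) := by
  simp [List.intercalate, List.intersperse]

theorem inner_eq_repN (p : List Char) : List.intercalate "</div><div>".toList (spN p) = repN p := by
  fun_induction spN p with
  | case1 => simp [List.intercalate, repN]
  | case2 t ih =>
    obtain ⟨q, r, hqr⟩ := List.exists_cons_of_ne_nil (spN_ne_nil t)
    rw [hqr] at ih ⊢
    rw [intercalate_cons_cons]
    have hr : repN ('\n'::t) = "</div><div>".toList ++ repN t := by simp [repN]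
    rw [hr, ← ih]
    simp
  | case3 c t hc ih =>
    obtain ⟨q, r, hqr⟩ := List.exists_cons_of_ne_nil (spN_ne_nil t)
    rw [hqr] at ih ⊢
    simp only [consHead, repN, if_neg hc]
    cases r with
    | nil => simp [List.intercalate] at ih ⊢; simp [ih]
    | cons q2 r2 =>
      rw [intercalate_cons_cons] at *
      exact congrArg (List.cons c) ih

theorem gPar_eq (p : List Char) :
    gPar p = "<div>".toList ++ repN p ++ "</div>".toList := by
  rw [gPar, splitOnN_eq, PySem.Chars.join, inner_eq_repN]

-- ---- the enumerate fold is joinBr ----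

theorem fold_enum (n : Int) : ∀ (ps : List (List Char)) (k : Int) (acc : List Char), 0 ≤ k → k + ps.length = n →
    (PySem.List.enumerate ps k).foldl (fun final_response ip =>
      let lines := PySem.Chars.splitOn ip.2 ['\n']
      let paragraph_html := "<div>".toList ++ PySem.Chars.join "</div><div>".toList lines ++ "</div>".toList
      let final_response := final_response ++ paragraph_html
      if ip.1 < n - 1 then final_response ++ "<br>".toList
      else final_response) acc = acc ++ joinBr (ps.map gPar) := by
  intro ps
  induction ps with
  | nil => intro k acc _ _; simp [PySem.List.enumerate, joinBr]
  | cons p rest ih =>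
    intro k acc hk hn
    simp only [PySem.List.enumerate, List.foldl_cons]
    cases rest with
    | nil =>
      have hlt : ¬ (k < n - 1) := by
        have e1 : ((([p] : List (List Char)).length : Nat) : Int) = 1 := by
          push_cast [List.length_cons, List.length_nil]; try ring
        omega
      simp only [hlt, if_false, PySem.List.enumerate, List.foldl_nil]
      simp [joinBr, gPar]
    | cons q rest2 =>
      have hlt : k < n - 1 := by
        have e1 : (((p :: q :: rest2).length : Nat) : Int) = (rest2.length : Int) + 2 := by
          push_cast [List.length_cons]; try ring
        omega
      simp only [hlt, if_true]
      rw [ih (k + 1) _ (by omega) (by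
        have e1 : (((p :: q :: rest2).length : Nat) : Int) = (rest2.length : Int) + 2 := by
          push_cast [List.length_cons]; try ring
        have e2 : (((q :: rest2).length : Nat) : Int) = (rest2.length : Int) + 1 := by
          push_cast [List.length_cons]; try ring
        omega)]
      simp [joinBr, gPar]

-- ---- the outer join over spNN = the scan ----

theorem joinBr_gPar (l : List Char) :
    joinBr ((spNN l).map gPar) = "<div>".toList ++ fScan l ++ "</div>".toList := by
  fun_induction spNN l with
  | case1 => simp [joinBr, gPar_eq, repN, fScan]
  | case2 t2 ih =>
    rw [fScan_two]
    obtain ⟨p, r, hpr⟩ := List.exists_cons_of_ne_nil (spNN_ne_nil t2)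
    rw [hpr] at ih
    simp only [hpr, List.map_cons, joinBr, List.isEmpty_cons, Bool.false_eq_true,
      if_false] at ih ⊢
    rw [gPar_eq, ih]
    simp [repN]
  | case3 c2 t2 hc2 ih =>
    rw [fScan_one _ _ hc2]
    obtain ⟨p, r, hpr⟩ := List.exists_cons_of_ne_nil (spNN_ne_nil (c2 :: t2))
    rw [hpr] at ih ⊢
    simp only [consHead, List.map_cons, joinBr] at ih ⊢
    rw [gPar_eq] at *
    have step : repN ('\n' :: p) = "</div><div>".toList ++ repN p := by simp [repN]
    rw [step]
    have ih' : repN p ++ ("</div>".toList ++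
        (if (r.map gPar).isEmpty then [] else "<br>".toList ++ joinBr (r.map gPar))) =
        fScan (c2 :: t2) ++ "</div>".toList := by
      have h2 := ih
      simp only [List.append_assoc] at h2 ⊢
      exact List.append_cancel_left h2
    simp only [List.append_assoc] at ih' ⊢
    rw [ih']
  | case4 =>
    rw [fScan_single]
    simp [joinBr, gPar_eq, repN]
  | case5 c t hc ih =>
    rw [fScan_other _ _ hc]
    obtain ⟨p, r, hpr⟩ := List.exists_cons_of_ne_nil (spNN_ne_nil t)
    rw [hpr] at ih ⊢
    simp only [consHead, List.map_cons, joinBr] at ih ⊢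
    rw [gPar_eq] at *
    have step : repN (c :: p) = c :: repN p := by simp [repN, hc]
    rw [step]
    have ih' : repN p ++ ("</div>".toList ++
        (if (r.map gPar).isEmpty then [] else "<br>".toList ++ joinBr (r.map gPar))) =
        fScan t ++ "</div>".toList := by
      have h2 := ih
      simp only [List.append_assoc] at h2 ⊢
      exact List.append_cancel_left h2
    simp only [List.append_assoc, List.cons_append] at ih' ⊢
    rw [ih']

-- ===== VERDICT (by name: the statement is the Claim_ definition above) =====
theorem new_line_formatter_spec : Claim_equal_new_line_formatter := by
  intro response _
  unfold Spec_new_line_formatter new_line_formatter new_line_formatter_alt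
  rw [replaceNN_eq, replaceN_eq, repN_repNN]
  simp only [splitOnNN_eq]
  rw [fold_enum ((spNN response.toList).length : Int) (spNN response.toList) 0 [] le_rfl (by simp)]
  rw [joinBr_gPar]
  simp
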